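-- pv_equiv track=rewrite | github.com/111110100/my-leetcode-codewars-hackerrank-submissions | codewars/madhav.py | is_madhav_array
-- ===== SOURCE A (Python) =====
-- def is_madhav_array(arr):
--     if len(arr) < 2:
--         return False
--     i = 1
--     k = 2
--     while i < len(arr):
--         t = 0
--         for j in range(k):
--             if i > len(arr)-1:
--                 return False
--             t += arr[i]
--             i += 1
--
--         if arr[0] != t:
--             return False
--         else:
--             k += 1
--
--     return True
-- ===== SOURCE B (Python) =====
-- def is_madhav_array(arr):
--     n = len(arr)
--     # length must make 8*n+1 a perfect odd square (n triangular): integer Newton sqrt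
--     d = 8 * n + 1
--     x = d
--     y = (x + d // x) // 2
--     while y < x:
--         x = y
--         y = (x + d // x) // 2
--     if x * x != d:
--         return False
--     m = (x - 1) // 2
--     if m < 2:
--         return False
--     # one prefix-sum pass: the running sum at each triangular boundary must be a multiple of the first element
--     prefix = [0]
--     s = 0
--     for v in arr:
--         s += v
--         prefix.append(s)
--     t = 0
--     for j in range(1, m + 1):
--         t += j
--         if prefix[t] != j * arr[0]:
--             return False
--     return True
-- ===== Notes on version B (the rewrite author's own statement) =====
-- stated objective: alternative
-- what changed: B replaces A's interleaved chunk-summing index walk by a closed-form length test (8*n+1 must be a perfect square, via an integer Newton square-root loop) followed by a single prefix-sum pass whose values at the triangular boundaries are compared against j-fold multiples of the first element, so no per-chunk sums are ever formed.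
import Mathlib
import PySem

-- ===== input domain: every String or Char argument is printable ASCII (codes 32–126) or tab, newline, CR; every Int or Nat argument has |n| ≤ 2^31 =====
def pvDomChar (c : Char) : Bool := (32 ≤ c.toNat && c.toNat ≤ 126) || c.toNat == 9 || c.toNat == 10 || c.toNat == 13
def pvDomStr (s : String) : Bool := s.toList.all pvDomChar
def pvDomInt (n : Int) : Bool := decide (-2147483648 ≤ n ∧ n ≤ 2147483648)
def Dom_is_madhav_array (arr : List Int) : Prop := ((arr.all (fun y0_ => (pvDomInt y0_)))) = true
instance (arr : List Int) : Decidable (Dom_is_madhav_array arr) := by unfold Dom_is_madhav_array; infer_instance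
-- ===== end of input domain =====

-- B: closed-form length test (8*n+1 a perfect square, by an integer Newton sqrt loop) plus one
-- prefix-sum pass compared to multiples of the first element; alternative decomposition, same cost as A.

-- ===== PORT A =====
-- inner 'for j in range(k)' loop: state (i, t); none = the 'return False' on running past the end
def pvInnerA (arr : List Int) : Nat → Nat → Int → Option (Nat × Int)
  | 0, i, t => some (i, t)
  | j+1, i, t =>
    if (i : Int) > (arr.length : Int) - 1 then none
    else pvInnerA arr j (i+1) (t + arr.getD i 0)

-- outer 'while i < len(arr)' loop; fuel arr.length is enough since i grows by k ≥ 2 each pass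
def pvOuterA (arr : List Int) : Nat → Nat → Nat → Bool
  | 0, _, _ => false
  | fuel+1, i, k =>
    if i < arr.length then
      match pvInnerA arr k i 0 with
      | none => false
      | some (i', t) => if arr.getD 0 0 ≠ t then false else pvOuterA arr fuel i' (k+1)
    else true

def is_madhav_array (arr : List Int) : Bool :=
  if arr.length < 2 then false else pvOuterA arr arr.length 1 2

-- ===== PORT B =====
-- 'while y < x: x = y; y = (x + d // x) // 2' of Source B (all values are Nat; Python's // = Nat./)
def pvNewton (d x y : Nat) : Nat :=
  if y < x then pvNewton d y ((y + d / y) / 2) else x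
termination_by x
decreasing_by omega

-- the prefix-sum pass of Source B: start from a zero-seeded list, append the running sum per element
def pvPrefix (arr : List Int) : List Int :=
  (arr.foldl (fun ps v => (ps.1 ++ [ps.2 + v], ps.2 + v)) ([0], 0)).1

-- the boundary-check loop of Source B: at each triangular index the running sum must be the j-fold first element
def pvCheckB (pfx : List Int) (a0 : Int) (m : Nat) (t j : Nat) : Bool :=
  if j ≤ m then
    if pfx.getD (t + j) 0 ≠ (j : Int) * a0 then false
    else pvCheckB pfx a0 m (t + j) (j+1)
  else true
termination_by m + 1 - j
decreasing_by omega

def is_madhav_array_alt (arr : List Int) : Bool :=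
  let n := arr.length
  let d := 8 * n + 1
  let x := pvNewton d d ((d + d / d) / 2)
  if x * x ≠ d then false
  else
    let m := (x - 1) / 2
    if m < 2 then false
    else pvCheckB (pvPrefix arr) (arr.getD 0 0) m 0 1

-- ===== PRECONDITION & SPEC =====
def Spec_is_madhav_array (arr : List Int) (out : Bool) : Prop := out = is_madhav_array_alt arr
instance (arr : List Int) (out : Bool) : Decidable (Spec_is_madhav_array arr out) := by unfold Spec_is_madhav_array; infer_instance

-- ===== CLAIM (what is proved, stated in full; the proofs are below) =====
def Claim_equal_is_madhav_array : Prop := ∀ (arr : List Int), Dom_is_madhav_array arr → Spec_is_madhav_array arr (is_madhav_array arr)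

-- ===== LEMMAS AND PROOFS =====

-- sum k + (k+1) + ... + m (0 if m < k), used to describe the index progress of A's loop
def pvSrange (k m : Nat) : Nat :=
  if k ≤ m then k + pvSrange (k+1) m else 0
termination_by m + 1 - k
decreasing_by omega

theorem pvSrange_eq (k m : Nat) (h1 : 1 ≤ k) (h2 : k ≤ m + 1) :
    2 * pvSrange k m + k * (k - 1) = m * (m + 1) := by
  revert h1 h2
  induction k using pvSrange.induct (m := m) with
  | case1 k hk ih =>
    intro h1 h2
    rw [pvSrange, if_pos hk]
    obtain ⟨k', rfl⟩ : ∃ k', k = k' + 1 := ⟨k - 1, by omega⟩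
    have := ih (by omega) (by omega)
    simp only [Nat.add_sub_cancel] at this ⊢
    nlinarith
  | case2 k hk =>
    intro h1 h2
    rw [pvSrange, if_neg hk]
    obtain rfl : k = m + 1 := by omega
    simp only [Nat.add_sub_cancel]
    nlinarith

theorem pvInnerA_spec (arr : List Int) (k : Nat) : ∀ (i : Nat) (t : Int), i ≤ arr.length →
    pvInnerA arr k i t =
      if i + k ≤ arr.length then some (i + k, t + ((arr.drop i).take k).sum) else none := by
  induction k with
  | zero =>
    intro i t hi
    simp [pvInnerA, hi]
  | succ k ih =>
    intro i t hi
    rw [pvInnerA]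
    by_cases hil : i < arr.length
    · rw [if_neg (by omega)]
      rw [ih (i+1) _ (by omega)]
      have hdrop : arr.drop i = arr[i] :: arr.drop (i+1) := List.drop_eq_getElem_cons hil
      have hget : arr.getD i 0 = arr[i] := List.getD_eq_getElem arr 0 hil
      by_cases hle : i + (k + 1) ≤ arr.length
      · rw [if_pos (by omega), if_pos hle]
        rw [hdrop, hget, List.take_succ_cons, List.sum_cons]
        have : i + 1 + k = i + (k + 1) := by omega
        rw [this, add_assoc]
      · rw [if_neg (by omega), if_neg hle]
    · rw [if_pos (by omega), if_neg (by omega)]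

theorem pvOuterA_true (arr : List Int) : ∀ (fuel i k : Nat), 1 ≤ k → i ≤ arr.length →
    pvOuterA arr fuel i k = true → ∃ e, i + pvSrange k e = arr.length := by
  intro fuel
  induction fuel with
  | zero => intro i k _ _ h; simp [pvOuterA] at h
  | succ f ih =>
    intro i k hk hi h
    rw [pvOuterA] at h
    by_cases hil : i < arr.length
    · rw [if_pos hil, pvInnerA_spec arr k i 0 hi] at h
      by_cases hik : i + k ≤ arr.length
      · rw [if_pos hik] at h
        simp only [zero_add] at h
        by_cases he : arr.getD 0 0 ≠ ((arr.drop i).take k).sum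
        · rw [if_pos he] at h; exact absurd h (by simp)
        · rw [if_neg he] at h
          obtain ⟨e, he2⟩ := ih (i+k) (k+1) (by omega) (by omega) h
          by_cases hke : k + 1 ≤ e
          · refine ⟨e, ?_⟩
            rw [pvSrange, if_pos (by omega)]
            omega
          · have hz : pvSrange (k+1) e = 0 := by rw [pvSrange, if_neg hke]
            refine ⟨k, ?_⟩
            rw [pvSrange, if_pos le_rfl, pvSrange, if_neg (by omega)]
            omega
      · rw [if_neg hik] at h; simp at h
    · refine ⟨0, ?_⟩
      rw [pvSrange, if_neg (by omega)]
      omega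

-- ---- Newton sqrt lemmas ----

theorem pvNewton_amgm (d x : Nat) (hx : 1 ≤ x) : Nat.sqrt d ≤ (x + d / x) / 2 := by
  have hsd : Nat.sqrt d * Nat.sqrt d ≤ d := by
    simpa [pow_two] using Nat.sqrt_le' d
  have h1 : Nat.sqrt d * Nat.sqrt d / x ≤ d / x := Nat.div_le_div_right hsd
  have h2 : 2 * Nat.sqrt d ≤ x + Nat.sqrt d * Nat.sqrt d / x := by
    by_cases hc : 2 * Nat.sqrt d ≤ x
    · exact hc.trans (Nat.le_add_right x _)
    · have h3 : (2 * Nat.sqrt d - x) * x ≤ Nat.sqrt d * Nat.sqrt d := by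
        zify [show x ≤ 2 * Nat.sqrt d by omega]
        nlinarith [sq_nonneg ((Nat.sqrt d : Int) - (x : Int))]
      have h4 : 2 * Nat.sqrt d - x ≤ Nat.sqrt d * Nat.sqrt d / x :=
        (Nat.le_div_iff_mul_le (by omega)).mpr h3
      omega
  rw [Nat.le_div_iff_mul_le (by norm_num : (0:Nat) < 2)]
  calc Nat.sqrt d * 2 = 2 * Nat.sqrt d := by ring
    _ ≤ x + Nat.sqrt d * Nat.sqrt d / x := h2
    _ ≤ x + d / x := Nat.add_le_add_left h1 x

theorem pvNewton_spec (d : Nat) (hd : 1 ≤ d) : ∀ (x y : Nat),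
    Nat.sqrt d ≤ x → y = (x + d / x) / 2 → pvNewton d x y = Nat.sqrt d := by
  intro x
  induction x using Nat.strong_induction_on with
  | _ x ih =>
    intro y hsx hy
    rw [pvNewton]
    by_cases hyx : y < x
    · rw [if_pos hyx]
      have hx1 : 1 ≤ x := by omega
      have hsy : Nat.sqrt d ≤ y := hy ▸ pvNewton_amgm d x hx1
      exact ih y hyx _ hsy rfl
    · rw [if_neg hyx]
      have hx1 : 1 ≤ x := by
        by_contra hc
        have : x = 0 := by omega
        have : Nat.sqrt d = 0 := by omega
        have : d = 0 := by
          have := Nat.sqrt_eq_zero.mp this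
          omega
        omega
      have hdx : x ≤ d / x := by
        by_contra hc
        have : (x + d / x) / 2 < x := by omega
        omega
      have hxx : x * x ≤ d := (Nat.le_div_iff_mul_le (by omega)).mp hdx
      have : x ≤ Nat.sqrt d := Nat.le_sqrt.mpr (by nlinarith)
      omega

-- ---- prefix-sum lemmas ----

theorem pvPrefix_foldl (arr : List Int) : ∀ (p : List Int) (s : Int),
    (arr.foldl (fun ps v => (ps.1 ++ [ps.2 + v], ps.2 + v)) (p, s)).1
      = p ++ (List.range arr.length).map (fun t => s + (arr.take (t+1)).sum) := by
  induction arr with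
  | nil => intro p s; simp
  | cons v rest ih =>
    intro p s
    simp only [List.foldl_cons, List.length_cons]
    rw [ih (p ++ [s + v]) (s + v)]
    rw [List.range_succ_eq_map]
    simp only [List.map_cons, List.map_map, List.append_assoc, List.singleton_append,
      List.take_succ_cons, List.sum_cons, List.take_zero, List.sum_nil]
    congr 1
    congr 1
    · ring
    · congr 1
      funext t
      simp only [Function.comp_apply, List.take_succ_cons, List.sum_cons]
      ring

theorem pvPrefix_getD (arr : List Int) (t : Nat) (ht : t ≤ arr.length) :
    (pvPrefix arr).getD t 0 = (arr.take t).sum := by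
  unfold pvPrefix
  rw [pvPrefix_foldl arr [0] 0]
  cases t with
  | zero => simp
  | succ u =>
    have hu : u < arr.length := by omega
    rw [List.getD_eq_getElem]
    · simp [hu]
    · simp [hu]

-- ---- bridge between A's loop and B's check loop ----

theorem pvBridge (arr : List Int) : ∀ (fuel m k i : Nat), 1 ≤ fuel → m + 2 - k ≤ fuel →
    2 ≤ k → i + pvSrange k m = arr.length →
    (arr.take i).sum = ((k : Int) - 1) * arr.getD 0 0 →
    pvOuterA arr fuel i k = pvCheckB (pvPrefix arr) (arr.getD 0 0) m i k := by
  intro fuel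
  induction fuel with
  | zero => intro m k i h1 _ _ _ _; omega
  | succ f ih =>
    intro m k i h1 h2 hk hi hinv
    rw [pvCheckB]
    by_cases hkm : k ≤ m
    · have hsr : pvSrange k m = k + pvSrange (k+1) m := by rw [pvSrange, if_pos hkm]
      have hik : i + k ≤ arr.length := by omega
      have hil : i < arr.length := by omega
      rw [pvOuterA, if_pos hil, pvInnerA_spec arr k i 0 (by omega), if_pos hik]
      simp only [zero_add]
      rw [if_pos hkm]
      have hpre : (pvPrefix arr).getD (i + k) 0 = (arr.take (i + k)).sum :=
        pvPrefix_getD arr (i + k) hik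
      have hsplit : (arr.take (i + k)).sum = (arr.take i).sum + ((arr.drop i).take k).sum := by
        rw [List.take_add, List.sum_append]
      set a0 := arr.getD 0 0 with ha0
      set c := ((arr.drop i).take k).sum with hc
      have hval : (pvPrefix arr).getD (i + k) 0 = ((k : Int) - 1) * a0 + c := by
        rw [hpre, hsplit, hinv]
      by_cases he : a0 = c
      · have hb : ¬ ((pvPrefix arr).getD (i + k) 0 ≠ (k : Int) * a0) := by
          rw [hval, ← he]; push_neg; ring
        rw [if_neg (not_not_intro he), if_neg hb]
        exact ih m (k+1) (i+k) (by omega) (by omega) (by omega) (by omega)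
          (by rw [hsplit, hinv, ← he]; push_cast; ring)
      · have hb : (pvPrefix arr).getD (i + k) 0 ≠ (k : Int) * a0 := by
          rw [hval]; intro hcon
          apply he
          have : c = (k : Int) * a0 - ((k : Int) - 1) * a0 := by omega
          rw [this]; ring
        rw [if_pos he, if_pos hb]
    · have hz : pvSrange k m = 0 := by rw [pvSrange, if_neg hkm]
      rw [pvOuterA, if_neg (by omega), if_neg hkm]

-- 8n+1 = x² forces x odd and n triangular with m = (x-1)/2
theorem pvSquare_odd (x n : Nat) (h : x * x = 8 * n + 1) : x % 2 = 1 := by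
  rcases Nat.even_or_odd x with he | ho
  · obtain ⟨a, rfl⟩ := he
    have : (a + a) * (a + a) = 4 * (a * a) := by ring
    omega
  · exact Nat.odd_iff.mp ho

-- ===== VERDICT (by name: the statement is the Claim_ definition above) =====
theorem is_madhav_array_spec : Claim_equal_is_madhav_array := by
  unfold Claim_equal_is_madhav_array
  intro arr _
  unfold Spec_is_madhav_array is_madhav_array is_madhav_array_alt
  simp only []
  set n := arr.length with hn
  set d := 8 * n + 1 with hd
  clear_value n
  have hd1 : 1 ≤ d := by omega
  have hx : pvNewton d d ((d + d / d) / 2) = Nat.sqrt d :=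
    pvNewton_spec d hd1 d _ (Nat.sqrt_le_self d) (by rw [Nat.div_self (by omega)])
  rw [hx]
  set x := Nat.sqrt d with hxs
  clear_value d x
  by_cases hsq : x * x = d
  · rw [if_neg (not_not_intro hsq)]
    have hodd : x % 2 = 1 := pvSquare_odd x n (by rw [← hd]; exact hsq)
    set m := (x - 1) / 2 with hm
    clear_value m
    have hxm : x = 2 * m + 1 := by omega
    have h2n : 2 * n = m * (m + 1) := by nlinarith [hsq, hxm]
    by_cases hm2 : m < 2
    · rw [if_pos hm2]
      -- B rejects; show A is false too
      by_cases hlen : n < 2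
      · rw [if_pos hlen]
      · rw [if_neg hlen]
        by_contra hA
        have htrue : pvOuterA arr n 1 2 = true := by
          revert hA; cases pvOuterA arr n 1 2 <;> simp
        obtain ⟨e, he⟩ := pvOuterA_true arr n 1 2 (by omega) (by omega) htrue
        have he2 : 2 ≤ e := by
          by_contra h'
          have : pvSrange 2 e = 0 := by rw [pvSrange, if_neg (by omega)]
          omega
        have hse := pvSrange_eq 2 e (by omega) (by omega)
        have h2n' : 2 * n = e * (e + 1) := by linarith
        have hm1 : m ≤ 1 := by omega
        have hle : m * (m + 1) ≤ 2 := by nlinarith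
        have hge : 6 ≤ e * (e + 1) := by nlinarith
        linarith
    · rw [if_neg hm2]
      have hm2' : 2 ≤ m := by omega
      have hge : 6 ≤ m * (m + 1) := by nlinarith
      have hn3 : 3 ≤ n := by linarith
      have hmn : m ≤ n := by nlinarith [Nat.le_add_left m (m * m)]
      rw [if_neg (by omega : ¬ n < 2)]
      have hse := pvSrange_eq 2 m (by omega) (by omega)
      rw [← h2n] at hse
      have hs : 1 + pvSrange 2 m = arr.length := by omega
      have hinv : (arr.take 1).sum = ((2 : Int) - 1) * arr.getD 0 0 := by
        have h0 : arr.take 1 = [arr.getD 0 0] := by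
          cases arr with
          | nil => simp at hn; omega
          | cons a rest => simp [List.getD]
        rw [h0]; simp
      -- B's first iteration (j = 1) is the trivial check that the first prefix sum is the first element
      have hB1 : pvCheckB (pvPrefix arr) (arr.getD 0 0) m 0 1
          = pvCheckB (pvPrefix arr) (arr.getD 0 0) m 1 2 := by
        rw [pvCheckB, if_pos (by omega : 1 ≤ m)]
        have hch : ¬ ((pvPrefix arr).getD (0 + 1) 0 ≠ ((1 : Nat) : Int) * arr.getD 0 0) := by
          push_neg
          have h01 : (pvPrefix arr).getD (0 + 1) 0 = (arr.take 1).sum :=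
            pvPrefix_getD arr 1 (by omega)
          rw [h01, hinv]
          push_cast
          ring
        rw [if_neg hch]
      rw [hB1]
      exact pvBridge arr n m 2 1 (by omega) (by omega) (by omega) hs hinv
  · rw [if_pos hsq]
    -- B rejects: 8n+1 is not a perfect square; show A is false
    by_cases hlen : n < 2
    · rw [if_pos hlen]
    · rw [if_neg hlen]
      by_contra hA
      have htrue : pvOuterA arr n 1 2 = true := by
        revert hA; cases pvOuterA arr n 1 2 <;> simp
      obtain ⟨e, he⟩ := pvOuterA_true arr n 1 2 (by omega) (by omega) htrue
      have he2 : 2 ≤ e := by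
        by_contra h'
        have : pvSrange 2 e = 0 := by rw [pvSrange, if_neg (by omega)]
        omega
      have hse := pvSrange_eq 2 e (by omega) (by omega)
      have h2n : 2 * n = e * (e + 1) := by linarith
      have hde : d = (2 * e + 1) * (2 * e + 1) := by nlinarith
      have : x = 2 * e + 1 := by rw [hxs, hde, ← pow_two, Nat.sqrt_eq']
      apply hsq
      rw [this, hde]
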